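-- pv_equiv track=rewrite | github.com/hosamsh/catchball | catchball.py | normalize_passthrough_args
-- ===== SOURCE A (Python) =====
-- from typing import IO, Callable, Sequence
--
-- class CatchballError(RuntimeError):
--     pass
--
-- def normalize_passthrough_args(argv: Sequence[str]) -> list[str]:
--     normalized: list[str] = []
--     index = 0
--
--     while index < len(argv):
--         option = argv[index]
--         if option in {"--worker-arg", "--fixer-arg", "--reviewer-arg"}:
--             if index + 1 >= len(argv) or not argv[index + 1] or argv[index + 1].startswith("--"):
--                 raise CatchballError(f"Missing value for {option}")
--             normalized.append(f"{option}={argv[index + 1]}")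
--             index += 2
--             continue
--         normalized.append(option)
--         index += 1
--
--     return normalized
-- ===== SOURCE B (Python) =====
-- class CatchballError(RuntimeError):
--     pass
--
-- def normalize_passthrough_args(argv):
--     # State-machine pass: no look-ahead or index pairing; a pending flag is carried
--     # as state and resolved when the next token arrives (or fails at end of input).
--     out = []
--     pending = None
--     for tok in argv:
--         if pending is not None:
--             if not tok or tok.startswith("--"):
--                 raise CatchballError(f"Missing value for {pending}")
--             out.append(f"{pending}={tok}")
--             pending = None
--         elif tok in ("--worker-arg", "--fixer-arg", "--reviewer-arg"):
--             pending = tok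
--         else:
--             out.append(tok)
--     if pending is not None:
--         raise CatchballError(f"Missing value for {pending}")
--     return out
-- ===== Notes on version B (the rewrite author's own statement) =====
-- stated objective: alternative
-- what changed: Replaced A's index-arithmetic pair-consuming while-loop (look-ahead argv[index+1], index += 2) by a Mealy-style state machine: a single token-at-a-time pass carrying a 'pending flag' state, resolving the flag when the following token arrives and failing on a leftover pending flag at the end.
import Mathlib
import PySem

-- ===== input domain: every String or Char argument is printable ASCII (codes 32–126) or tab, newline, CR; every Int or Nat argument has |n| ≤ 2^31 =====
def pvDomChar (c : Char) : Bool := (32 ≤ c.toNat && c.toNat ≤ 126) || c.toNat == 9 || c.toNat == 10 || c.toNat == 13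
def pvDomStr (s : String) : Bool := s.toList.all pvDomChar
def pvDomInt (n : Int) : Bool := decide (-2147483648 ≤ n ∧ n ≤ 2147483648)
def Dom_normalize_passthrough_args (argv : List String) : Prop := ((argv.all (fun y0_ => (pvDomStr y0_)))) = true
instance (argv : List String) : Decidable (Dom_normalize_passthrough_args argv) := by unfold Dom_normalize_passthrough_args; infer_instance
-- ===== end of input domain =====

-- B replaces A's index-arithmetic pair-consuming while-loop by a state-machine pass carrying a pending flag; objective: alternative decomposition, same O(n) cost.


-- ===== PORT A =====
-- option ∈ {"--worker-arg", "--fixer-arg", "--reviewer-arg"}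
def pvIsFlag (s : String) : Bool :=
  s == "--worker-arg" || s == "--fixer-arg" || s == "--reviewer-arg"

-- A's while-loop over an explicit index; in the two `raise CatchballError` branches the
-- port returns the accumulator (those inputs lie outside Pre_).
def pvLoopA (argv : List String) (index : Nat) (normalized : List String) : List String :=
  if index < argv.length then
    if pvIsFlag (argv.getD index "") then
      if argv.length ≤ index + 1 then normalized   -- raise CatchballError
      else
        if argv.getD (index + 1) "" = "" || PySem.Str.startswith (argv.getD (index + 1) "") "--" then
          normalized   -- raise CatchballError
        else pvLoopA argv (index + 2) (normalized ++ [argv.getD index "" ++ "=" ++ argv.getD (index + 1) ""])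
    else pvLoopA argv (index + 1) (normalized ++ [argv.getD index ""])
  else normalized
termination_by argv.length - index

def normalize_passthrough_args (argv : List String) : List String :=
  pvLoopA argv 0 []

-- ===== PORT B =====
-- B's state-machine pass: one token at a time, carrying the pending flag as state.
-- In the `raise CatchballError` branches the port returns [] (outside Pre_).
def pvLoopB : Option String → List String → List String
  | none, [] => []
  | some _, [] => []   -- leftover pending flag at end of input → raise CatchballError
  | some p, tok :: rest =>
    if tok = "" || PySem.Str.startswith tok "--" then []   -- raise CatchballError
    else (p ++ "=" ++ tok) :: pvLoopB none rest
  | none, tok :: rest =>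
    if pvIsFlag tok then pvLoopB (some tok) rest
    else tok :: pvLoopB none rest

def normalize_passthrough_args_alt (argv : List String) : List String :=
  pvLoopB none argv

-- ===== PRECONDITION & SPEC =====
-- Pre_ excludes exactly the inputs on which A raises CatchballError: some flag option is
-- last, or is followed by an empty string or a "--"-prefixed token.
def Pre_normalize_passthrough_args (argv : List String) : Prop :=
  ∀ i < argv.length, pvIsFlag (argv.getD i "") = true →
    i + 1 < argv.length ∧ argv.getD (i + 1) "" ≠ "" ∧
      PySem.Str.startswith (argv.getD (i + 1) "") "--" = false

instance (argv : List String) : Decidable (Pre_normalize_passthrough_args argv) := by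
  unfold Pre_normalize_passthrough_args; infer_instance

def pvWitness_normalize_passthrough_args : List String :=
  ["--worker-arg", "x", "foo", "--fixer-arg", "y z"]

def Spec_normalize_passthrough_args (argv : List String) (out : List String) : Prop := out = normalize_passthrough_args_alt argv
instance (argv : List String) (out : List String) : Decidable (Spec_normalize_passthrough_args argv out) := by unfold Spec_normalize_passthrough_args; infer_instance

-- ===== CLAIM (what is proved, stated in full; the proofs are below) =====
def Claim_equal_normalize_passthrough_args : Prop := ∀ (argv : List String), Dom_normalize_passthrough_args argv → Pre_normalize_passthrough_args argv → Spec_normalize_passthrough_args argv (normalize_passthrough_args argv)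

-- ===== LEMMAS AND PROOFS =====

-- pvLoopB from the neutral state, non-flag head
theorem pvLoopB_nonflag (o : String) (rest : List String) (h : pvIsFlag o = false) :
    pvLoopB none (o :: rest) = o :: pvLoopB none rest := by
  simp [pvLoopB, h]

-- pvLoopB from the neutral state: a flag followed by a legal value
theorem pvLoopB_flag (o v : String) (rest : List String) (h : pvIsFlag o = true)
    (h2 : v ≠ "") (h3 : PySem.Str.startswith v "--" = false) :
    pvLoopB none (o :: v :: rest) = (o ++ "=" ++ v) :: pvLoopB none rest := by
  rw [pvLoopB, if_pos h, pvLoopB,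
    if_neg (by rw [Bool.or_eq_false_iff.mpr ⟨decide_eq_false h2, h3⟩]; exact Bool.false_ne_true)]

-- Loop invariant: from index, A's loop yields the accumulator followed by B's machine
-- (started in the neutral state) run on the remaining suffix, provided no flag in argv
-- is missing its value.
theorem pvLoopA_eq (argv : List String)
    (hP : Pre_normalize_passthrough_args argv) :
    ∀ fuel index normalized, argv.length - index ≤ fuel →
      pvLoopA argv index normalized = normalized ++ pvLoopB none (argv.drop index) := by
  intro fuel
  induction fuel with
  | zero =>
    intro index normalized hf
    have hge : argv.length ≤ index := by omega
    rw [pvLoopA, List.drop_eq_nil_of_le hge]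
    simp [Nat.not_lt.mpr hge, pvLoopB]
  | succ n ih =>
    intro index normalized hf
    by_cases hlt : index < argv.length
    · have hdrop : argv.drop index = argv.getD index "" :: argv.drop (index + 1) := by
        rw [List.getD_eq_getElem _ _ hlt, List.drop_eq_getElem_cons hlt]
      rw [pvLoopA, if_pos hlt]
      by_cases hflag : pvIsFlag (argv.getD index "") = true
      · obtain ⟨h1, h2, h3⟩ := hP index hlt hflag
        have hdrop2 : argv.drop (index + 1) = argv.getD (index + 1) "" :: argv.drop (index + 2) := by
          rw [List.getD_eq_getElem _ _ h1, List.drop_eq_getElem_cons h1]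
        rw [if_pos hflag, if_neg (Nat.not_le.mpr h1),
          if_neg (show ¬ (decide (argv.getD (index + 1) "" = "") || PySem.Str.startswith (argv.getD (index + 1) "") "--") = true by
            rw [Bool.or_eq_false_iff.mpr ⟨decide_eq_false h2, h3⟩]; exact Bool.false_ne_true),
          ih (index + 2) _ (by omega), hdrop, hdrop2,
          pvLoopB_flag _ _ _ hflag h2 h3, List.append_assoc, List.singleton_append]
      · rw [if_neg hflag, ih (index + 1) _ (by omega), hdrop,
          pvLoopB_nonflag _ _ (Bool.not_eq_true _ ▸ hflag), List.append_assoc, List.singleton_append]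
    · rw [pvLoopA, if_neg hlt, List.drop_eq_nil_of_le (Nat.not_lt.mp hlt)]
      simp [pvLoopB]

-- ===== VERDICT (by name: the statement is the Claim_ definition above) =====
theorem normalize_passthrough_args_spec : Claim_equal_normalize_passthrough_args := by
  intro argv _ hP
  unfold Spec_normalize_passthrough_args normalize_passthrough_args normalize_passthrough_args_alt
  simpa using pvLoopA_eq argv hP (argv.length) 0 [] (by omega)
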